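-- pv_equiv track=rewrite | github.com/tigreclip/Practicas_Mastering4SkillsUsingPython | 12_Lists/listas_practica_3_index_de_2_valores_max.py | max2_argax_v1
-- ===== SOURCE A (Python) =====
-- def max2_argax_v1(lst):
--     # comprobar que la lista tiene dos o más elementos
--     if len(lst) < 2:
--         return None, None
--
--     # usar las primeras dos posiciones para los dos máximos superiores
--     pos_max1, pos_max2 = 0, 1
--     if lst[pos_max1] < lst[pos_max2]:
--         pos_max1, pos_max2 = 1, 0
--
--     # ITERAR Y ACTUALIZAR índices basados en el actual elemento SI ES MAYOR
--     for pos_actual in range(2, len(lst)):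
--         if lst[pos_max1] < lst[pos_actual]:
--             pos_max1, pos_max2 = pos_actual, pos_max1
--         elif lst[pos_max2] < lst[pos_actual]:
--             pos_max2 = pos_actual
--
--     return pos_max1, pos_max2
-- ===== SOURCE B (Python) =====
-- def max2_argax_v1(lst):
--     if len(lst) < 2:
--         return None, None
--     i1 = max(range(len(lst)), key=lambda i: lst[i])
--     i2 = max((i for i in range(len(lst)) if i != i1), key=lambda i: lst[i])
--     return i1, i2
-- ===== Notes on version B (the rewrite author's own statement) =====
-- stated objective: simpler
-- what changed: Replaces the single-pass simultaneous top-two index tracking with two independent leftmost-argmax scans (max over range with key), the second one skipping the first winner's index.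
import Mathlib
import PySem

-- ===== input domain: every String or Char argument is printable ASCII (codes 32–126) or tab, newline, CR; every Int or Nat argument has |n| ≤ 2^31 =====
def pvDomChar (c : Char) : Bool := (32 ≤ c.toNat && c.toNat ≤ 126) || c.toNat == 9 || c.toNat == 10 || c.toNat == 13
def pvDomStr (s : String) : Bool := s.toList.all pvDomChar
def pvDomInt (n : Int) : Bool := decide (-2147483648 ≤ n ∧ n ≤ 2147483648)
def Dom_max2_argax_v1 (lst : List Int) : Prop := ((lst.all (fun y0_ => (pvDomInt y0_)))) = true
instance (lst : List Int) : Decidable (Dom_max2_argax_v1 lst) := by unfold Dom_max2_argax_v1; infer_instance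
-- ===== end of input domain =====

-- B replaces A's single-pass simultaneous top-two index tracking by two independent
-- leftmost-argmax scans (objective: simpler); same return value, no side effects.

-- ===== PORT A =====
-- lst[i] is only evaluated at indices 0 ≤ i < len(lst), so pyGetD with default 0 is exact here
def max2_argax_v1 (lst : List Int) : Option Int × Option Int :=
  if lst.length < 2 then (none, none)
  else
    let val := fun i : Int => PySem.List.pyGetD lst i 0
    let init : Int × Int := if val 0 < val 1 then (1, 0) else (0, 1)
    let fin := (PySem.List.pyRange 2 lst.length 1).foldl
      (fun (p : Int × Int) i =>
        if val p.1 < val i then (i, p.1)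
        else if val p.2 < val i then (p.1, i)
        else p) init
    (some fin.1, some fin.2)

-- ===== PORT B =====
-- Python's max(iterable, key): start from the first element, keep the current best
-- unless the next key is STRICTLY greater (leftmost winner on ties)
def pvArgmax (val : Int → Int) (h : Int) (t : List Int) : Int :=
  t.foldl (fun b i => if val b < val i then i else b) h

def max2_argax_v1_alt (lst : List Int) : Option Int × Option Int :=
  if lst.length < 2 then (none, none)
  else
    let val := fun i : Int => PySem.List.pyGetD lst i 0
    -- i1 = max(range(len(lst)), key=...): fold from index 0 over the remaining indices
    let i1 := pvArgmax val 0 (PySem.List.pyRange 1 lst.length 1)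
    -- i2 = max((i for i in range(len(lst)) if i != i1), key=...)
    match (PySem.List.pyRange 0 lst.length 1).filter (fun i => i != i1) with
    | [] => (none, none)  -- unreachable: len(lst) ≥ 2 leaves at least one index ≠ i1
    | h :: t => (some i1, some (pvArgmax val h t))

-- ===== PRECONDITION & SPEC =====
def Spec_max2_argax_v1 (lst : List Int) (out : Option Int × Option Int) : Prop := out = max2_argax_v1_alt lst
instance (lst : List Int) (out : Option Int × Option Int) : Decidable (Spec_max2_argax_v1 lst out) := by unfold Spec_max2_argax_v1; infer_instance

-- ===== CLAIM (what is proved, stated in full; the proofs are below) =====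
def Claim_equal_max2_argax_v1 : Prop := ∀ (lst : List Int), Dom_max2_argax_v1 lst → Spec_max2_argax_v1 lst (max2_argax_v1 lst)

-- ===== LEMMAS AND PROOFS =====

-- argmax of a list written as head :: tail, 0 for []
def pvArgmaxL (val : Int → Int) : List Int → Int
  | [] => 0
  | h :: t => pvArgmax val h t

theorem pvArgmax_append (val : Int → Int) (h k : Int) (t : List Int) :
    pvArgmax val h (t ++ [k]) = if val (pvArgmax val h t) < val k then k else pvArgmax val h t := by
  simp [pvArgmax, List.foldl_append]

theorem pvArgmaxL_append (val : Int → Int) (k : Int) (l : List Int) (hl : l ≠ []) :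
    pvArgmaxL val (l ++ [k]) = if val (pvArgmaxL val l) < val k then k else pvArgmaxL val l := by
  cases l with
  | nil => exact absurd rfl hl
  | cons h t => simp [pvArgmaxL, pvArgmax_append]

theorem pvArgmax_mem (val : Int → Int) (t : List Int) (h : Int) :
    pvArgmax val h t ∈ h :: t := by
  induction t generalizing h with
  | nil => simp [pvArgmax]
  | cons x xs ih =>
    simp only [pvArgmax, List.foldl_cons]
    by_cases hc : val h < val x
    · simp only [hc, if_pos]
      have := ih x
      simp at this ⊢
      tauto
    · simp only [hc, if_neg, not_false_iff]
      have := ih h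
      simp at this ⊢
      tauto

-- the first scan's winner is a valid index: 0 ≤ i1 < k
theorem pvA1_bounds (val : Int → Int) (k : Nat) (hk : 2 ≤ k) :
    0 ≤ pvArgmax val 0 (PySem.List.pyRange 1 k 1) ∧ pvArgmax val 0 (PySem.List.pyRange 1 k 1) < (k : Int) := by
  have hm := pvArgmax_mem val (PySem.List.pyRange 1 k 1) 0
  rcases List.mem_cons.mp hm with h0 | hmem
  · rw [h0]; constructor <;> [exact le_refl 0; exact_mod_cast Nat.lt_of_lt_of_le Nat.zero_lt_two hk]
  · rw [PySem.List.mem_pyRange_one] at hmem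
    exact ⟨le_trans zero_le_one hmem.1, hmem.2⟩

theorem range0_cons (k : Nat) (hk : 2 ≤ k) :
    PySem.List.pyRange 0 k 1 = 0 :: PySem.List.pyRange 1 k 1 := by
  have : (0 : Int) < (k : Int) := by exact_mod_cast Nat.lt_of_lt_of_le Nat.zero_lt_two hk
  rw [PySem.List.pyRange_one_cons this]
  norm_num

-- elements strictly below k are untouched by the filter ≠ k
theorem filter_ne_top (j : Int) (a : Int) (k : Nat) (hj : (k:Int) ≤ j) :
    (PySem.List.pyRange a k 1).filter (fun i => i != j) = PySem.List.pyRange a k 1 := by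
  apply List.filter_eq_self.mpr
  intro x hx
  have := (PySem.List.mem_pyRange_one.mp hx).2
  simp only [bne_iff_ne, ne_eq]
  omega

-- the filtered index list is never empty when k ≥ 2
theorem filter_ne_nonempty (j : Int) (k : Nat) (hk : 2 ≤ k) :
    (PySem.List.pyRange 0 k 1).filter (fun i => i != j) ≠ [] := by
  rw [range0_cons k hk]
  by_cases h0 : (0 : Int) = j
  · subst h0
    simp only [List.filter_cons, bne_self_eq_false]
    have : (PySem.List.pyRange 1 k 1).filter (fun i => i != (0:Int)) = PySem.List.pyRange 1 k 1 := by
      apply List.filter_eq_self.mpr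
      intro x hx
      have := (PySem.List.mem_pyRange_one.mp hx).1
      simp only [bne_iff_ne, ne_eq]; omega
    rw [this]
    have : (1:Int) < (k:Int) := by exact_mod_cast hk
    rw [PySem.List.pyRange_one_cons this]
    simp
  · have : ((0:Int) != j) = true := by simp [bne_iff_ne]; omega
    simp [this]

-- the second component of A's state, characterised as B computes it
def pvSnd2 (val : Int → Int) (k : Nat) (j : Int) : Int :=
  pvArgmaxL val ((PySem.List.pyRange 0 k 1).filter (fun i => i != j))

-- MAIN INVARIANT: A's fold over range(2,k) lands exactly on B's two argmax scans
theorem pv_inv (val : Int → Int) (k : Nat) (hk : 2 ≤ k) :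
    (PySem.List.pyRange 2 k 1).foldl
      (fun (p : Int × Int) i =>
        if val p.1 < val i then (i, p.1)
        else if val p.2 < val i then (p.1, i)
        else p)
      (if val 0 < val 1 then ((1:Int), (0:Int)) else (0, 1))
    = (pvArgmax val 0 (PySem.List.pyRange 1 k 1),
       pvSnd2 val k (pvArgmax val 0 (PySem.List.pyRange 1 k 1))) := by
  induction k with
  | zero => omega
  | succ n ih =>
    rcases Nat.lt_or_ge n 2 with hn | hn
    · -- base: n + 1 = 2
      interval_cases n
      · omega
      · have h22 : PySem.List.pyRange 2 ((2:Nat):Int) 1 = [] := by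
          apply PySem.List.pyRange_one_eq_nil; norm_num
        have h12 : PySem.List.pyRange 1 ((2:Nat):Int) 1 = [1] := by
          have := PySem.List.pyRange_one_singleton (a := (1:Int)); norm_num at this ⊢; exact this
        have h02 : PySem.List.pyRange 0 ((2:Nat):Int) 1 = [0, 1] := by
          have h0 : (0:Int) < ((2:Nat):Int) := by norm_num
          rw [PySem.List.pyRange_one_cons h0]
          have := PySem.List.pyRange_one_singleton (a := (1:Int)); norm_num at this ⊢; exact this
        rw [h22, h12]
        simp only [List.foldl_nil]
        by_cases hc : val 0 < val 1
        · simp only [hc, if_pos]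
          have : pvArgmax val 0 [1] = 1 := by simp [pvArgmax, hc]
          rw [this, pvSnd2, h02]
          norm_num [pvArgmaxL, pvArgmax]
        · simp only [hc, if_neg, not_false_iff]
          have : pvArgmax val 0 [1] = 0 := by simp [pvArgmax, hc]
          rw [this, pvSnd2, h02]
          norm_num [pvArgmaxL, pvArgmax]
    · -- step: n ≥ 2
      have hcast : ((n+1 : Nat) : Int) = (n : Int) + 1 := by push_cast; ring
      have h2n : (2:Int) ≤ (n:Int) := by exact_mod_cast hn
      have h1n : (1:Int) ≤ (n:Int) := by omega
      have h0n : (0:Int) ≤ (n:Int) := by omega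
      have hr2 : PySem.List.pyRange 2 ((n+1:Nat):Int) 1 = PySem.List.pyRange 2 n 1 ++ [(n:Int)] := by
        rw [hcast]; exact PySem.List.pyRange_one_succ_right h2n
      have hr1 : PySem.List.pyRange 1 ((n+1:Nat):Int) 1 = PySem.List.pyRange 1 n 1 ++ [(n:Int)] := by
        rw [hcast]; exact PySem.List.pyRange_one_succ_right h1n
      have hr0 : PySem.List.pyRange 0 ((n+1:Nat):Int) 1 = PySem.List.pyRange 0 n 1 ++ [(n:Int)] := by
        rw [hcast]; exact PySem.List.pyRange_one_succ_right h0n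
      set A1 := pvArgmax val 0 (PySem.List.pyRange 1 n 1) with hA1
      have hb := pvA1_bounds val n hn
      rw [hr2, List.foldl_append, ih hn]
      simp only [List.foldl_cons, List.foldl_nil]
      have hA1' : pvArgmax val 0 (PySem.List.pyRange 1 ((n+1:Nat):Int) 1)
          = if val A1 < val n then (n:Int) else A1 := by
        rw [hr1, pvArgmax_append]
      by_cases hc : val A1 < val (n:Int)
      · -- new maximum at index n
        simp only [hc, if_pos]
        rw [hA1', if_pos hc]
        have hsnd : pvSnd2 val (n+1) (n:Int) = A1 := by
          rw [pvSnd2, hr0, List.filter_append]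
          have h1 : ((PySem.List.pyRange 0 n 1).filter (fun i => i != (n:Int)))
              = PySem.List.pyRange 0 n 1 := filter_ne_top (n:Int) 0 n (le_refl _)
          have h2 : ([(n:Int)].filter (fun i => i != (n:Int))) = [] := by simp
          rw [h1, h2, List.append_nil, range0_cons n hn]
          rfl
        rw [hsnd]
      · -- maximum unchanged; maybe update second
        rw [hA1', if_neg hc]
        simp only [hc, if_neg, not_false_iff]
        have hkA : ((n:Int) != A1) = true := by simp [bne_iff_ne]; omega
        have hfil : (PySem.List.pyRange 0 ((n+1:Nat):Int) 1).filter (fun i => i != A1)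
            = (PySem.List.pyRange 0 n 1).filter (fun i => i != A1) ++ [(n:Int)] := by
          rw [hr0, List.filter_append]
          simp [hkA]
        have hne := filter_ne_nonempty A1 n hn
        have hsnd : pvSnd2 val (n+1) A1
            = if val (pvSnd2 val n A1) < val (n:Int) then (n:Int) else pvSnd2 val n A1 := by
          rw [pvSnd2, hfil, pvArgmaxL_append _ _ _ hne]; rfl
        by_cases hd : val (pvSnd2 val n A1) < val (n:Int)
        · simp only [hd, if_pos]
          rw [hsnd, if_pos hd]
        · simp only [hd, if_neg, not_false_iff]
          rw [hsnd, if_neg hd]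

-- ===== VERDICT (by name: the statement is the Claim_ definition above) =====
theorem max2_argax_v1_spec : Claim_equal_max2_argax_v1 := by
  intro lst _
  unfold Spec_max2_argax_v1 max2_argax_v1 max2_argax_v1_alt
  by_cases hlen : lst.length < 2
  · simp [hlen]
  · simp only [hlen, if_neg, not_false_iff]
    have hk : 2 ≤ lst.length := Nat.le_of_not_lt hlen
    set val := fun i : Int => PySem.List.pyGetD lst i 0 with hval
    rw [pv_inv val lst.length hk]
    set i1 := pvArgmax val 0 (PySem.List.pyRange 1 lst.length 1) with hi1
    have hne := filter_ne_nonempty i1 lst.length hk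
    rcases hfl : (PySem.List.pyRange 0 lst.length 1).filter (fun i => i != i1) with _ | ⟨h, t⟩
    · exact absurd hfl hne
    · simp only [pvSnd2, hfl, pvArgmaxL]
      rfl
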